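-- pv_equiv track=rewrite | github.com/rsmiles/CoralLight | coral_light/text_mode.py | subvars
-- ===== SOURCE A (Python) =====
-- def subvar(query, var_name, value):
-- 	"""
-- 	Search query for the string var_name, preceeded by a dollar sign ($). Substitute
-- 	said string for the specified value. Return substituted string.
-- 	"""
-- 	return query.replace('$' + var_name, value)
--
-- def subvars(query, var_list):
-- 	"""
-- 	Substitute all variables in query, with their definitions in var_list.
--
-- 	query: A string, representing an SQL query. Within the string, are variables,
-- 			appearing as names preceeded by dollar signs ($).
-- 	var_list: A list of tuples, each tuple has two elements, a variable name, and
-- 				the value to be assigned to that variable.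
-- 	"""
-- 	if len(var_list) == 0:
-- 		return [query]
--
-- 	nvals = len(var_list[0][1])
--
-- 	for binding in var_list:
-- 		assert len(binding[1]) == nvals, 'All variables must have the same number of values'
--
-- 	results = []
-- 	val_index = 0
-- 	while val_index < nvals:
-- 		new_query = query
-- 		for binding in var_list:
-- 			new_query = subvar(new_query, binding[0], binding[1][val_index])
--
-- 		results.append(new_query)
-- 		val_index += 1
--
-- 	return results
-- ===== SOURCE B (Python) =====
-- def subvars(query, var_list):
-- 	"""
-- 	Substitute all variables in query, with their definitions in var_list.
--
-- 	Recursive formulation: start from nvals copies of the template and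
-- 	consume the binding list recursively, rewriting every partial result
-- 	by splitting it on the '$name' pattern and joining the pieces with the
-- 	value paired to it by zip.
-- 	"""
-- 	if len(var_list) == 0:
-- 		return [query]
--
-- 	nvals = len(var_list[0][1])
-- 	for binding in var_list:
-- 		assert len(binding[1]) == nvals, 'All variables must have the same number of values'
--
-- 	def go(partials, bindings):
-- 		if not bindings:
-- 			return partials
-- 		(name, vals), rest = bindings[0], bindings[1:]
-- 		pat = '$' + name
-- 		return go([v.join(p.split(pat)) for p, v in zip(partials, vals)], rest)
--
-- 	return go([query] * nvals, var_list)
-- ===== Notes on version B (the rewrite author's own statement) =====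
-- stated objective: alternative
-- what changed: B is a recursion over the binding list carrying the list of partially-substituted queries as an accumulator (started as nvals template copies), pairs each partial with its value by zip, and performs each substitution by splitting on the '$name' pattern and joining the pieces with the value, instead of A's index-driven while loop that rebuilds each query with repeated str.replace.
import Mathlib
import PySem

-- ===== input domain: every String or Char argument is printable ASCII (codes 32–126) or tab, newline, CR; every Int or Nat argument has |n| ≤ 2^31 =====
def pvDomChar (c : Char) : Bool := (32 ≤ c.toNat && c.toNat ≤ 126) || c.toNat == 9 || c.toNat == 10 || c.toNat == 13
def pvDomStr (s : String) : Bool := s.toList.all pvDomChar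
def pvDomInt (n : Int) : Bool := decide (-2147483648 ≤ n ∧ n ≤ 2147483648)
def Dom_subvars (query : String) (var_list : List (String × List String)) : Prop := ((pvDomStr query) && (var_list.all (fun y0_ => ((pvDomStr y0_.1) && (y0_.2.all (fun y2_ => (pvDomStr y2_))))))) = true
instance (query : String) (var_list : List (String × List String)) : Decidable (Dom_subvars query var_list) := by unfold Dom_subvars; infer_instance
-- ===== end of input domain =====

-- B rebuilds the same results by a recursion over the binding list with split/join substitution; equivalence is about the return value.

-- ===== PORT A =====
-- subvar(query, var_name, value) = query.replace('$' + var_name, value)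
def subvar (query : String) (var_name : String) (value : String) : String :=
  PySem.Str.replace query ("$" ++ var_name) value

-- the while loop over val_index, appending one fully-substituted query per index;
-- binding[1][val_index] is in range under Pre_ (the asserts); pyGetD "" is the total guard
def subvars (query : String) (var_list : List (String × List String)) : List String :=
  if var_list.length = 0 then [query]
  else
    let nvals := (PySem.List.pyGetD var_list 0 ("", [])).2.length
    (List.range nvals).foldl
      (fun results (val_index : Nat) =>
        results ++ [var_list.foldl
          (fun new_query binding =>
            subvar new_query binding.1 (PySem.List.pyGetD binding.2 (Int.ofNat val_index) ""))
          query])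
      []

-- ===== PORT B =====
-- the recursive helper go(partials, bindings): each step rewrites every partial,
-- paired by zip with its value, by splitting on '$name' and joining with the value;
-- q.split(pat) with pat = '$'+name nonempty always yields a list, [q] is the total guard
def subvarsGo (partials : List String) (bindings : List (String × List String)) : List String :=
  match bindings with
  | [] => partials
  | (name, vals) :: rest =>
      subvarsGo
        ((partials.zip vals).map (fun p =>
          PySem.Str.join p.2 ((PySem.Str.split? p.1 ("$" ++ name)).getD [p.1])))
        rest

def subvars_alt (query : String) (var_list : List (String × List String)) : List String :=
  if var_list.length = 0 then [query]
  else
    let nvals := (PySem.List.pyGetD var_list 0 ("", [])).2.length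
    subvarsGo (List.replicate nvals query) var_list

-- ===== PRECONDITION & SPEC =====
-- Pre_ excludes exactly the inputs where A's assert raises AssertionError: some binding's
-- value list has a different length from the first binding's.
def Pre_subvars (query : String) (var_list : List (String × List String)) : Prop :=
  (var_list.all (fun b => b.2.length == (var_list.headD ("", [])).2.length)) = true
instance (query : String) (var_list : List (String × List String)) : Decidable (Pre_subvars query var_list) := by unfold Pre_subvars; infer_instance

def pvWitness_subvars : String × (List (String × List String)) :=
  ("select $x from $t", [("x", ["a", "b"]), ("t", ["u", "v"])])

def Spec_subvars (query : String) (var_list : List (String × List String)) (out : List String) : Prop := out = subvars_alt query var_list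
instance (query : String) (var_list : List (String × List String)) (out : List String) : Decidable (Spec_subvars query var_list out) := by unfold Spec_subvars; infer_instance

-- ===== CLAIM (what is proved, stated in full; the proofs are below) =====
def Claim_equal_subvars : Prop := ∀ (query : String) (var_list : List (String × List String)), Dom_subvars query var_list → Pre_subvars query var_list → Spec_subvars query var_list (subvars query var_list)

-- ===== LEMMAS AND PROOFS =====

-- str.replace by split/join: PySem.Chars.splitOn.go never produces []
theorem splitOn_go_ne_nil (sep : List Char) (fuel : Nat) (l cur : List Char) (acc : List (List Char)) :
    PySem.Chars.splitOn.go sep fuel l cur acc ≠ [] := by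
  induction fuel generalizing l cur acc with
  | zero => simp [PySem.Chars.splitOn.go]
  | succ f ih =>
    cases l with
    | nil => simp [PySem.Chars.splitOn.go]
    | cons c t =>
      rw [PySem.Chars.splitOn.go]
      split_ifs <;> apply ih

-- normalize splitOn.go's accumulators
theorem splitOn_go_acc (sep : List Char) (fuel : Nat) (l cur : List Char) (acc : List (List Char)) :
    PySem.Chars.splitOn.go sep fuel l cur acc
      = acc.reverse ++ (PySem.Chars.splitOn.go sep fuel l [] []).modifyHead (cur.reverse ++ ·) := by
  induction fuel generalizing l cur acc with
  | zero => simp [PySem.Chars.splitOn.go]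
  | succ f ih =>
    cases l with
    | nil => simp [PySem.Chars.splitOn.go]
    | cons c t =>
      rw [PySem.Chars.splitOn.go]
      rw [show PySem.Chars.splitOn.go sep (f+1) (c::t) [] [] = _ from rfl, PySem.Chars.splitOn.go]
      split_ifs with h
      · rw [ih _ [] (cur.reverse :: acc), ih _ [] [[].reverse]]
        simp
      · rw [ih _ (c::cur) acc, ih _ [c] []]
        simp [List.modifyHead_modifyHead, Function.comp_def]

-- replace's scan equals intercalating the pieces splitOn's scan produces (any sufficient fuels)
theorem replace_go_eq (old new : List Char) (hold : old ≠ []) :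
    ∀ (f1 f2 : Nat) (l acc : List Char), l.length ≤ f1 → l.length ≤ f2 →
    PySem.Chars.replace.go old new f1 l acc
      = acc.reverse ++ List.intercalate new (PySem.Chars.splitOn.go old f2 l [] []) := by
  intro f1
  induction f1 with
  | zero =>
    intro f2 l acc h1 h2
    have hl : l = [] := by cases l <;> simp_all
    subst hl
    cases f2 <;> simp [PySem.Chars.replace.go, PySem.Chars.splitOn.go, List.intercalate]
  | succ f ih =>
    intro f2 l acc h1 h2
    cases l with
    | nil =>
      cases f2 <;> simp [PySem.Chars.replace.go, PySem.Chars.splitOn.go, List.intercalate]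
    | cons c t =>
      cases f2 with
      | zero => simp at h2
      | succ g =>
        rw [PySem.Chars.replace.go, PySem.Chars.splitOn.go]
        have hol : 1 ≤ old.length := by cases old <;> simp_all
        split_ifs with h
        · have hdrop : (List.drop old.length (c::t)).length ≤ f := by
            simp only [List.length_drop]; simp at h1 ⊢; omega
          have hdrop2 : (List.drop old.length (c::t)).length ≤ g := by
            simp only [List.length_drop]; simp at h2 ⊢; omega
          rw [ih _ _ _ hdrop hdrop2]
          rw [splitOn_go_acc old g _ [] [[].reverse]]
          obtain ⟨p, ps, hps⟩ := List.exists_cons_of_ne_nil (splitOn_go_ne_nil old g (List.drop old.length (c::t)) [] [])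
          rw [hps]
          simp [List.intercalate]
        · have ht : t.length ≤ f := by simp at h1; omega
          have ht2 : t.length ≤ g := by simp at h2; omega
          rw [ih _ _ _ ht ht2]
          rw [splitOn_go_acc old g t [c] []]
          obtain ⟨p, ps, hps⟩ := List.exists_cons_of_ne_nil (splitOn_go_ne_nil old g t [] [])
          rw [hps]
          cases ps <;> simp [List.intercalate, List.intersperse]

theorem chars_replace_eq (s old new : List Char) (hold : old ≠ []) :
    PySem.Chars.replace s old new = PySem.Chars.join new (PySem.Chars.splitOn s old) := by
  unfold PySem.Chars.replace PySem.Chars.splitOn PySem.Chars.join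
  rw [if_neg (by simpa using hold)]
  exact replace_go_eq old new hold s.length (s.length + 1) s [] (le_refl _) (by omega)

-- Python's q.replace(pat, v) = v.join(q.split(pat)) for nonempty pat
theorem str_replace_eq (q pat v : String) (hpat : pat.toList ≠ []) :
    PySem.Str.replace q pat v = PySem.Str.join v ((PySem.Str.split? q pat).getD [q]) := by
  unfold PySem.Str.replace PySem.Str.join PySem.Str.split? PySem.Chars.split?
  rw [if_neg (by simpa using hpat)]
  simp [chars_replace_eq q.toList pat.toList v.toList hpat, Function.comp_def]

-- B's recursion over bindings equals per-index sequential substitution, given equal column lengths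
theorem subvarsGo_eq_mapIdx (L : List (String × List String)) (init : List String)
    (hL : ∀ b ∈ L, b.2.length = init.length) :
    subvarsGo init L
      = init.mapIdx (fun i q =>
          L.foldl (fun nq b =>
            PySem.Str.join (b.2.getD i "") ((PySem.Str.split? nq ("$" ++ b.1)).getD [nq])) q) := by
  induction L generalizing init with
  | nil =>
    apply List.ext_getElem
    · simp [subvarsGo]
    · intro k h1 h2; simp [subvarsGo]
  | cons b L ih =>
    obtain ⟨name, vals⟩ := b
    have hlen : vals.length = init.length := hL _ (List.mem_cons_self ..)
    have hzlen : ((init.zip vals).map (fun p =>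
        PySem.Str.join p.2 ((PySem.Str.split? p.1 ("$" ++ name)).getD [p.1]))).length = init.length := by
      simp [hlen]
    rw [show subvarsGo init ((name, vals) :: L) = subvarsGo _ L from rfl]
    rw [ih _ (fun b hb => by rw [hzlen]; exact hL b (List.mem_cons_of_mem _ hb))]
    apply List.ext_getElem
    · simp [hlen]
    · intro k h1 h2
      simp only [List.getElem_mapIdx, List.getElem_map, List.getElem_zip, List.foldl_cons]
      have hk : k < vals.length := by simp [hzlen, hlen] at h1 ⊢; omega
      congr 1
      simp [List.getD, hk]

-- A's loop: appending one result per index is mapping over the range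
theorem mapIdx_replicate_str (f : Nat → String → String) (n : Nat) (q : String) :
    List.mapIdx f (List.replicate n q) = (List.range n).map (fun i => f i q) := by
  apply List.ext_getElem <;> simp

theorem subvars_eq (query : String) (var_list : List (String × List String))
    (hpre : Pre_subvars query var_list) :
    subvars query var_list = subvars_alt query var_list := by
  unfold subvars subvars_alt
  by_cases h : var_list.length = 0
  · simp [h]
  · simp only [h, if_false]
    have hne : var_list ≠ [] := by intro hh; simp [hh] at h
    have hnv : ∀ b ∈ var_list, b.2.length = (PySem.List.pyGetD var_list 0 ("", [])).2.length := by
      intro b hb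
      unfold Pre_subvars at hpre
      rw [List.all_eq_true] at hpre
      have := hpre b hb
      obtain ⟨c, cs, hcs⟩ := List.exists_cons_of_ne_nil hne
      simp [hcs, PySem.List.pyGetD, PySem.List.pyIdx?, PySem.List.pyGet?] at this ⊢
      omega
    rw [subvarsGo_eq_mapIdx _ _ (by simpa using hnv), mapIdx_replicate_str]
    rw [PySem.List.foldl_append_singleton_eq_map]
    apply List.map_congr_left
    intro i hi
    apply PySem.List.foldl_congr_mem
    intro acc b hb
    rw [List.mem_range] at hi
    have hbl : i < b.2.length := by rw [hnv b hb]; exact hi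
    rw [subvar, str_replace_eq _ _ _ (by simp)]
    congr 1
    simp [PySem.List.pyGetD, PySem.List.pyIdx?, PySem.List.pyGet?, List.getD, hbl]

-- ===== VERDICT (by name: the statement is the Claim_ definition above) =====
theorem subvars_spec : Claim_equal_subvars := by
  intro query var_list _ hpre
  unfold Spec_subvars
  exact subvars_eq query var_list hpre
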